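-- pv_equiv track=rewrite | github.com/m1n5eo/Baekjoon | Codewars/Flick Switch/Flick Switch.py | flick_switch
-- ===== SOURCE A (Python) =====
-- def flick_switch(lst):
--     prt = [False] * len(lst)
--     sw = 0
--     for i in range(len(lst)):
--         if lst[i] == 'flick':
--             if sw == 0:
--                 prt[i] = False
--                 sw = 1
--             elif sw == 1:
--                 prt[i] = True
--                 sw = 0
--         elif lst[i] != 'flick':
--             if sw == 0:
--                 prt[i] = True
--             elif sw == 1:
--                 prt[i] = False
--     return prt
-- ===== SOURCE B (Python) =====
-- def flick_switch(lst):
--     # pass 1: inclusive prefix counts of 'flick'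
--     counts = []
--     c = 0
--     for w in lst:
--         c += (w == 'flick')
--         counts.append(c)
--     # pass 2: map each count to its parity (even count = light on)
--     return [k % 2 == 0 for k in counts]
-- ===== Notes on version B (the rewrite author's own statement) =====
-- stated objective: alternative
-- what changed: Replaces A's in-place toggled boolean state machine writing into a prefilled array with a two-pass prefix-sum formulation: build an inclusive cumulative count of 'flick' occurrences, then map each count to its parity.
import Mathlib
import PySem

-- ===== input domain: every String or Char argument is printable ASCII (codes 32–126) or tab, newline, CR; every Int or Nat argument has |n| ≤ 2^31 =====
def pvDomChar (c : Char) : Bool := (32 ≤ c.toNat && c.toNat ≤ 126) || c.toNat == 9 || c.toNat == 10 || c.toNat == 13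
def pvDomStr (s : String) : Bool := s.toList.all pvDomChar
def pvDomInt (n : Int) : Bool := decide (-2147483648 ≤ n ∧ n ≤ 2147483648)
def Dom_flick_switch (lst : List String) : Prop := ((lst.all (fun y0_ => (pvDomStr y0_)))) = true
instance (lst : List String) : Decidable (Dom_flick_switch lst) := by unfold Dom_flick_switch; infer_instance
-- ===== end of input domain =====

-- B differs from A by decomposition (prefix counts + parity map instead of a toggled switch); same values everywhere.

-- ===== PORT A =====
-- A's loop over indices with state sw ∈ {0,1}, transliterated as structural recursion
-- carrying sw; prt[i] is emitted in the same branch order as A writes it.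
def pvGoA : List String → Int → List Bool
  | [], _ => []
  | x :: xs, sw =>
    if x == "flick" then
      if sw == 0 then false :: pvGoA xs 1
      else if sw == 1 then true :: pvGoA xs 0
      else false :: pvGoA xs sw          -- unreachable padding: prt prefilled False
    else
      if sw == 0 then true :: pvGoA xs sw
      else if sw == 1 then false :: pvGoA xs sw
      else false :: pvGoA xs sw          -- unreachable padding: prt prefilled False

def flick_switch (lst : List String) : List Bool := pvGoA lst 0

-- ===== PORT B =====
-- pass 1 of Source B: inclusive prefix counts of "flick"
def pvCounts : List String → Nat → List Nat
  | [], _ => []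
  | w :: ws, c =>
    let c' := c + (if w == "flick" then 1 else 0)
    c' :: pvCounts ws c'

-- pass 2 of Source B: parity map
def flick_switch_alt (lst : List String) : List Bool :=
  (pvCounts lst 0).map (fun k => k % 2 == 0)

-- ===== PRECONDITION & SPEC =====
def Spec_flick_switch (lst : List String) (out : List Bool) : Prop := out = flick_switch_alt lst
instance (lst : List String) (out : List Bool) : Decidable (Spec_flick_switch lst out) := by unfold Spec_flick_switch; infer_instance

-- ===== CLAIM (what is proved, stated in full; the proofs are below) =====
def Claim_equal_flick_switch : Prop := ∀ (lst : List String), Dom_flick_switch lst → Spec_flick_switch lst (flick_switch lst)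

-- ===== LEMMAS AND PROOFS =====

-- Invariant: A's switch equals the parity of B's running count.
theorem pvGo_eq (xs : List String) : ∀ (c : Nat),
    pvGoA xs (if c % 2 = 0 then 0 else 1) = (pvCounts xs c).map (fun k => k % 2 == 0) := by
  induction xs with
  | nil => intro c; simp [pvGoA, pvCounts]
  | cons x xs ih =>
    intro c
    by_cases hx : x == "flick"
    · by_cases hc : c % 2 = 0
      · have h1 : (c + 1) % 2 = 1 := by omega
        simpa [pvGoA, pvCounts, hx, hc, h1] using ih (c + 1)
      · have h1 : (c + 1) % 2 = 0 := by omega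
        simpa [pvGoA, pvCounts, hx, hc, h1] using ih (c + 1)
    · by_cases hc : c % 2 = 0
      · simpa [pvGoA, pvCounts, hx, hc] using ih c
      · simpa [pvGoA, pvCounts, hx, hc] using ih c

-- ===== VERDICT (by name: the statement is the Claim_ definition above) =====
theorem flick_switch_spec : Claim_equal_flick_switch := by
  intro lst _
  unfold Spec_flick_switch flick_switch flick_switch_alt
  simpa using pvGo_eq lst 0
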